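-- pv_equiv track=rewrite | github.com/Doctor3131/PraktikumASA | Pertemuan3/(Medium)ReinkarnasiJajanManis/pastryMilleMorteln.py | hitungNilaiSegmen
-- ===== SOURCE A (Python) =====
-- def hitungNilaiSegmen(kue, n):
--     nilai = []
--     for i in range(n):
--         nilai.append([0] * n)
--
--     for l in range(n):
--         jenis_unik = {}
--         for r in range(l, n):
--             if kue[r] not in jenis_unik:
--                 jenis_unik[kue[r]] = 1
--             nilai[l][r] = len(jenis_unik)
--
--     return nilai
-- ===== SOURCE B (Python) =====
-- def hitungNilaiSegmen(kue, n):
--     # next occurrence of kue[l] after l (or n), computed right-to-left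
--     nxt = [0] * n
--     seen = {}
--     for i in range(n):
--         l = n - 1 - i
--         nxt[l] = seen.get(kue[l], n)
--         seen[kue[l]] = l
--     # dynamic programming over rows, bottom row first:
--     # distinct(l, r) = distinct(l+1, r) + (1 if kue[l] does not reappear in (l, r])
--     rows = []
--     below = [0] * n
--     for i in range(n):
--         l = n - 1 - i
--         row = [0] * l + [below[r] + (1 if r < nxt[l] else 0) for r in range(l, n)]
--         rows.append(row)
--         below = row
--     return rows[::-1]
-- ===== Notes on version B (the rewrite author's own statement) =====
-- stated objective: alternative
-- what changed: A counts distinct values from scratch for every left endpoint with a per-segment membership dict; B uses dynamic programming across rows built bottom-up: it precomputes each position's next-occurrence index right-to-left and derives row l from row l+1 via distinct(l,r) = distinct(l+1,r) + [kue[l] does not reappear by r], reversing the row list at the end.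
import Mathlib
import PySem

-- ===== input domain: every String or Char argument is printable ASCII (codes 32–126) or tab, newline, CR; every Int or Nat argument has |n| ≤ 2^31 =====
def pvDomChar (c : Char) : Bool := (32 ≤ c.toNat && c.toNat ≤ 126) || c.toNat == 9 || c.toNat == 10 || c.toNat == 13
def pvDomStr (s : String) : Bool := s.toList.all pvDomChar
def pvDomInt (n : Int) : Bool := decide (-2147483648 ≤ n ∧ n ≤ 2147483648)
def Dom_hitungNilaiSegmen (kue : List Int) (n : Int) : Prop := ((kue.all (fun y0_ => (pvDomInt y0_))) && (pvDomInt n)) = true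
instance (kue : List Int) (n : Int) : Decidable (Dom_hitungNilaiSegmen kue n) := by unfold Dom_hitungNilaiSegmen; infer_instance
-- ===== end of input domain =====

-- B replaces A's per-left-endpoint distinct recount by dynamic programming across rows: a
-- right-to-left pass computes each index's next-occurrence, then every row is derived from the
-- row below it and the row list is reversed (alternative decomposition, same O(n^2) cost).

-- ===== PORT A =====
-- Literal port of A: build an n×n zero table, then for each l a fresh dict of seen values,
-- setting nilai[l][r] = len(dict) as r sweeps right.
def hitungNilaiSegmen (kue : List Int) (n : Int) : List (List Int) :=
  let nilai := (PySem.List.pyRange 0 n 1).foldl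
      (fun acc _ => acc ++ [PySem.List.pyRepeat [(0 : Int)] n]) []
  (PySem.List.pyRange 0 n 1).foldl (fun nilai l =>
    ((PySem.List.pyRange l n 1).foldl
      (fun (st : PySem.Dict Int Int × List (List Int)) r =>
        let d := if st.1.contains (PySem.List.pyGetD kue r 0) = false
                 then st.1.insert (PySem.List.pyGetD kue r 0) 1 else st.1
        (d, PySem.List.pySetD st.2 l
              (PySem.List.pySetD (PySem.List.pyGetD st.2 l []) r (d.size : Int))))
      (PySem.Dict.empty, nilai)).2) nilai


-- ===== PORT B =====
-- Literal port of B (Source B): right-to-left pass filling nxt[l] = next index holding kue[l] (or n),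
-- then rows built bottom-up, each from the previous ('below') row, and the list reversed at the
-- end (rows[::-1] ported as slice? with step -1, total here since step ≠ 0).
def hitungNilaiSegmen_alt (kue : List Int) (n : Int) : List (List Int) :=
  let st := (PySem.List.pyRange 0 n 1).foldl
      (fun (st : List Int × PySem.Dict Int Int) i =>
        let l := n - 1 - i
        (PySem.List.pySetD st.1 l (st.2.getD (PySem.List.pyGetD kue l 0) n),
         st.2.insert (PySem.List.pyGetD kue l 0) l))
      (PySem.List.pyRepeat [(0 : Int)] n, PySem.Dict.empty)
  let nxt := st.1
  let rb := (PySem.List.pyRange 0 n 1).foldl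
      (fun (rb : List (List Int) × List Int) i =>
        let l := n - 1 - i
        let row := PySem.List.pyRepeat [(0 : Int)] l ++
          (PySem.List.pyRange l n 1).map (fun r =>
            PySem.List.pyGetD rb.2 r 0 +
              (if r < PySem.List.pyGetD nxt l 0 then 1 else 0))
        (rb.1 ++ [row], row))
      ([], PySem.List.pyRepeat [(0 : Int)] n)
  (PySem.List.slice? rb.1 none none (-1)).getD []


-- ===== PRECONDITION & SPEC =====
-- Pre_ excludes exactly the inputs on which A raises IndexError (kue[r] with n exceeding len(kue)).
def Pre_hitungNilaiSegmen (kue : List Int) (n : Int) : Prop := n ≤ (kue.length : Int)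
instance (kue : List Int) (n : Int) : Decidable (Pre_hitungNilaiSegmen kue n) := by unfold Pre_hitungNilaiSegmen; infer_instance
def pvWitness_hitungNilaiSegmen : List Int × Int := ([1, 2, 1], 3)

def Spec_hitungNilaiSegmen (kue : List Int) (n : Int) (out : List (List Int)) : Prop := out = hitungNilaiSegmen_alt kue n
instance (kue : List Int) (n : Int) (out : List (List Int)) : Decidable (Spec_hitungNilaiSegmen kue n out) := by unfold Spec_hitungNilaiSegmen; infer_instance

-- ===== CLAIM (what is proved, stated in full; the proofs are below) =====
def Claim_equal_hitungNilaiSegmen : Prop := ∀ (kue : List Int) (n : Int), Dom_hitungNilaiSegmen kue n → Pre_hitungNilaiSegmen kue n → Spec_hitungNilaiSegmen kue n (hitungNilaiSegmen kue n)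

-- ===== LEMMAS AND PROOFS =====

def pvG (kue : List Int) (j : Nat) : Int := kue.getD j 0
def pvNew (kue : List Int) (l i : Nat) : Bool := decide (∀ t, l ≤ t → t < i → pvG kue t ≠ pvG kue i)
def pvCnt (kue : List Int) (l r : Nat) : Nat := (List.range' l (r - l)).countP (fun i => pvNew kue l i)
def pvRow (kue : List Int) (m l r0 : Nat) : List Int :=
  (List.range m).map (fun t => if l ≤ t ∧ t < r0 then (pvCnt kue l (t+1) : Int) else 0)

lemma pvRow_self (kue : List Int) (m l : Nat) : pvRow kue m l l = List.replicate m 0 := by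
  unfold pvRow
  rw [List.map_congr_left (g := fun _ => (0:Int)) (by intro t _; rw [if_neg]; omega),
    List.map_const', List.length_range]

lemma pvCnt_self (kue : List Int) (l : Nat) : pvCnt kue l l = 0 := by
  simp [pvCnt]

lemma pvCnt_succ (kue : List Int) (l r : Nat) (h : l ≤ r) :
    pvCnt kue l (r+1) = pvCnt kue l r + (if pvNew kue l r then 1 else 0) := by
  unfold pvCnt
  have h1 : r + 1 - l = (r - l) + 1 := by omega
  have h2 : l + 1 * (r - l) = r := by omega
  rw [h1, List.range'_concat, List.countP_append, h2]
  simp [List.countP_cons]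

lemma pvRow_set (kue : List Int) (m l r0 : Nat) (hl : l ≤ r0) (hr : r0 < m) :
    (pvRow kue m l r0).set r0 ((pvCnt kue l (r0+1) : Nat) : Int) = pvRow kue m l (r0+1) := by
  unfold pvRow
  apply List.ext_getElem
  · simp
  · intro t h1 h2
    simp only [List.length_set, List.length_map, List.length_range] at h1
    simp only [List.getElem_set, List.getElem_map, List.getElem_range]
    by_cases ht : r0 = t
    · subst ht
      rw [if_pos rfl, if_pos ⟨hl, Nat.lt_succ_self r0⟩]
    · rw [if_neg ht]
      have h3 : (l ≤ t ∧ t < r0) ↔ (l ≤ t ∧ t < r0 + 1) := by omega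
      simp only [h3]

lemma size_insert_fresh (d : PySem.Dict Int Int) (k : Int) (v : Int) (h : d.contains k = false) :
    (d.insert k v).size = d.size + 1 := by
  simp [PySem.Dict.size, PySem.Dict.items_insert_of_not_contains _ _ h]

lemma innerA (kue : List Int) (m l : Nat) (hl : l < m)
    (tbl : List (List Int)) (hlen : tbl.length = m)
    (hrow : tbl.getD l [] = List.replicate m (0 : Int)) :
    ∀ r0 : Nat, l ≤ r0 → r0 ≤ m →
    ∃ d : PySem.Dict Int Int,
      ((PySem.List.pyRange (l : Int) (r0 : Int) 1).foldl
        (fun (st : PySem.Dict Int Int × List (List Int)) r =>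
          let d := if st.1.contains (PySem.List.pyGetD kue r 0) = false
                   then st.1.insert (PySem.List.pyGetD kue r 0) 1 else st.1
          (d, PySem.List.pySetD st.2 (l : Int)
                (PySem.List.pySetD (PySem.List.pyGetD st.2 (l : Int) []) r (d.size : Int))))
        (PySem.Dict.empty, tbl))
      = (d, tbl.set l (pvRow kue m l r0))
      ∧ (∀ v, d.contains v = true ↔ ∃ i, l ≤ i ∧ i < r0 ∧ pvG kue i = v)
      ∧ d.size = pvCnt kue l r0 := by
  have hl' : l < tbl.length := by omega
  have htl : tbl[l] = List.replicate m (0 : Int) := by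
    rw [List.getD_eq_getElem?_getD, List.getElem?_eq_getElem hl'] at hrow
    simpa using hrow
  intro r0 hlr
  induction r0, hlr using Nat.le_induction with
  | base =>
    intro _
    refine ⟨PySem.Dict.empty, ?_, ?_, ?_⟩
    · rw [PySem.List.pyRange_one_eq_nil le_rfl, List.foldl_nil, pvRow_self, ← htl,
        List.set_getElem_self]
    · intro v
      simp only [PySem.Dict.contains_empty, Bool.false_eq_true, false_iff]
      push_neg
      intro i h1 h2
      omega
    · simp [PySem.Dict.size_empty, pvCnt_self]
  | succ r0 hlr ih =>
    intro hr1
    have hr0m : r0 < m := by omega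
    obtain ⟨d, hfold, hcont, hsize⟩ := ih (by omega)
    have hcast : ((r0 + 1 : Nat) : Int) = (r0 : Int) + 1 := by push_cast; ring
    rw [hcast, PySem.List.pyRange_one_succ_right (by exact_mod_cast hlr), List.foldl_append,
      hfold, List.foldl_cons, List.foldl_nil]
    have hv : PySem.List.pyGetD kue ((r0 : Nat) : Int) 0 = pvG kue r0 :=
      PySem.List.pyGetD_natCast kue r0 0
    have hgetrow : PySem.List.pyGetD (tbl.set l (pvRow kue m l r0)) ((l : Nat) : Int) []
        = pvRow kue m l r0 := by
      rw [PySem.List.pyGetD_natCast, List.getD_eq_getElem?_getD, List.getElem?_set_self]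
      all_goals simp [hl']
    have hsetrow : ∀ x : Int, PySem.List.pySetD (pvRow kue m l r0) ((r0 : Nat) : Int) x
        = (pvRow kue m l r0).set r0 x := fun x => PySem.List.pySetD_natCast _ r0 x
    have hsettbl : ∀ row : List Int, PySem.List.pySetD (tbl.set l (pvRow kue m l r0)) ((l : Nat) : Int) row
        = tbl.set l row := by
      intro row
      rw [PySem.List.pySetD_natCast, List.set_set]
    by_cases hnew : ∀ t, l ≤ t → t < r0 → pvG kue t ≠ pvG kue r0
    · have hnewb : pvNew kue l r0 = true := by simp only [pvNew, decide_eq_true_eq]; exact hnew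
      have hcf : d.contains (pvG kue r0) = false := by
        cases hcb : d.contains (pvG kue r0) with
        | false => rfl
        | true =>
          obtain ⟨i, h1, h2, h3⟩ := (hcont _).mp hcb
          exact absurd h3 (hnew i h1 h2)
      have hsz : (d.insert (pvG kue r0) 1).size = pvCnt kue l (r0 + 1) := by
        rw [size_insert_fresh d _ 1 hcf, hsize, pvCnt_succ kue l r0 hlr, hnewb]
        simp
      refine ⟨d.insert (pvG kue r0) 1, ?_, ?_, ?_⟩
      · simp only [hv, hcf, hgetrow, hsetrow, hsettbl, eq_self_iff_true, ite_true]
        rw [hsz]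
        rw [pvRow_set kue m l r0 hlr hr0m]
      · intro v
        rw [PySem.Dict.contains_insert]
        constructor
        · intro h
          rcases Bool.or_eq_true_iff.mp h with h | h
          · exact ⟨r0, hlr, Nat.lt_succ_self r0, (eq_of_beq h).symm⟩
          · obtain ⟨i, h1, h2, h3⟩ := (hcont v).mp h
            exact ⟨i, h1, by omega, h3⟩
        · rintro ⟨i, h1, h2, h3⟩
          by_cases hi : i = r0
          · subst hi
            simp [← h3]
          · have : i < r0 := by omega
            rw [(hcont v).mpr ⟨i, h1, this, h3⟩]
            simp
      · exact hsz
    · push_neg at hnew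
      obtain ⟨i0, hi1, hi2, hi3⟩ := hnew
      have hnewb : pvNew kue l r0 = false := by
        simp only [pvNew, decide_eq_false_iff_not]
        push_neg
        exact ⟨i0, hi1, hi2, hi3⟩
      have hct : d.contains (pvG kue r0) = true := (hcont _).mpr ⟨i0, hi1, hi2, hi3⟩
      have hsz : d.size = pvCnt kue l (r0 + 1) := by
        rw [hsize, pvCnt_succ kue l r0 hlr, hnewb]
        simp
      refine ⟨d, ?_, ?_, ?_⟩
      · simp only [hv, hct, hgetrow, hsetrow, hsettbl, Bool.true_eq_false, ite_false]
        rw [hsz]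
        rw [pvRow_set kue m l r0 hlr hr0m]
      · intro v
        rw [hcont v]
        constructor
        · rintro ⟨i, h1, h2, h3⟩
          exact ⟨i, h1, by omega, h3⟩
        · rintro ⟨i, h1, h2, h3⟩
          by_cases hi : i = r0
          · subst hi
            exact ⟨i0, hi1, hi2, by rw [hi3, h3]⟩
          · exact ⟨i, h1, by omega, h3⟩
      · exact hsz

lemma outerA (kue : List Int) (m : Nat) :
    ∀ k : Nat, k ≤ m →
    ((PySem.List.pyRange 0 (k : Int) 1).foldl (fun nilai l =>
      ((PySem.List.pyRange l (m : Int) 1).foldl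
        (fun (st : PySem.Dict Int Int × List (List Int)) r =>
          let d := if st.1.contains (PySem.List.pyGetD kue r 0) = false
                   then st.1.insert (PySem.List.pyGetD kue r 0) 1 else st.1
          (d, PySem.List.pySetD st.2 l
                (PySem.List.pySetD (PySem.List.pyGetD st.2 l []) r (d.size : Int))))
        (PySem.Dict.empty, nilai)).2)
      (List.replicate m (List.replicate m (0 : Int))))
    = (List.range m).map (fun q => if q < k then pvRow kue m q m else List.replicate m (0 : Int)) := by
  intro k
  induction k with
  | zero =>
    intro _
    simp only [Nat.cast_zero]
    rw [PySem.List.pyRange_one_eq_nil le_rfl, List.foldl_nil,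
      List.map_congr_left (g := fun _ => List.replicate m (0 : Int)) (by intro q _; rw [if_neg]; omega),
      List.map_const', List.length_range]
  | succ k ih =>
    intro hk1
    have hkm : k < m := by omega
    have hrowk : ((List.range m).map (fun q => if q < k then pvRow kue m q m else List.replicate m (0 : Int))).getD k []
        = List.replicate m (0 : Int) := by
      simp [List.getD_eq_getElem?_getD, List.getElem?_map, List.getElem?_range, hkm]
    obtain ⟨d, hfold, -, -⟩ := innerA kue m k hkm
      ((List.range m).map (fun q => if q < k then pvRow kue m q m else List.replicate m (0 : Int)))
      (by simp) hrowk m hkm.le le_rfl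
    rw [show ((k + 1 : Nat) : Int) = (k : Int) + 1 by push_cast; ring,
      PySem.List.pyRange_one_succ_right (by exact_mod_cast Nat.zero_le k), List.foldl_append,
      ih (by omega), List.foldl_cons, List.foldl_nil]
    simp only [hfold]
    apply List.ext_getElem
    · simp
    · intro t h1 h2
      simp only [List.length_set, List.length_map, List.length_range] at h1
      simp only [List.getElem_set, List.getElem_map, List.getElem_range]
      by_cases ht : k = t
      · subst ht
        rw [if_pos rfl, if_pos (Nat.lt_succ_self k)]
      · rw [if_neg ht]
        have h3 : (t < k) ↔ (t < k + 1) := by omega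
        simp only [h3]

lemma tableA (kue : List Int) (n : Int) :
    hitungNilaiSegmen kue n = (List.range n.toNat).map (fun l => pvRow kue n.toNat l n.toNat) := by
  by_cases hn0 : n ≤ 0
  · have h0 : n.toNat = 0 := by omega
    rw [h0]
    simp [hitungNilaiSegmen, PySem.List.pyRange_one_eq_nil hn0]
  · push_neg at hn0
    have hnm : ((n.toNat : Nat) : Int) = n := by omega
    rw [← hnm]
    simp only [Int.toNat_natCast]
    have hdef : hitungNilaiSegmen kue ((n.toNat : Nat) : Int) =
      (PySem.List.pyRange 0 ((n.toNat : Nat) : Int) 1).foldl (fun nilai l =>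
        ((PySem.List.pyRange l ((n.toNat : Nat) : Int) 1).foldl
          (fun (st : PySem.Dict Int Int × List (List Int)) r =>
            let d := if st.1.contains (PySem.List.pyGetD kue r 0) = false
                     then st.1.insert (PySem.List.pyGetD kue r 0) 1 else st.1
            (d, PySem.List.pySetD st.2 l
                  (PySem.List.pySetD (PySem.List.pyGetD st.2 l []) r (d.size : Int))))
          (PySem.Dict.empty, nilai)).2)
        ((PySem.List.pyRange 0 ((n.toNat : Nat) : Int) 1).foldl
          (fun acc _ => acc ++ [PySem.List.pyRepeat [(0 : Int)] ((n.toNat : Nat) : Int)]) []) := rfl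
    have hinit : (PySem.List.pyRange 0 ((n.toNat : Nat) : Int) 1).foldl
        (fun acc _ => acc ++ [PySem.List.pyRepeat [(0 : Int)] ((n.toNat : Nat) : Int)]) []
        = List.replicate n.toNat (List.replicate n.toNat (0 : Int)) := by
      simp only [PySem.List.foldl_append_singleton_eq_map, PySem.List.pyRepeat_singleton,
        List.nil_append, List.map_const', PySem.List.length_pyRange_one, Int.toNat_natCast]
      norm_num
      omega
    rw [hdef, hinit, outerA kue n.toNat n.toNat le_rfl]
    apply List.map_congr_left
    intro q hq
    rw [if_pos (List.mem_range.mp hq)]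

-- ----- B side: next-occurrence search and the row recurrence -----

def pvNxtAux (kue : List Int) (v : Int) : Nat → Nat → Nat
  | 0, i => i
  | fuel+1, i => if pvG kue i = v then i else pvNxtAux kue v fuel (i+1)

def pvNxt (kue : List Int) (m l : Nat) : Nat := pvNxtAux kue (pvG kue l) (m - (l+1)) (l+1)

lemma pvNxtAux_ge (kue : List Int) (v : Int) (fuel : Nat) :
    ∀ i, i ≤ pvNxtAux kue v fuel i := by
  induction fuel with
  | zero => intro i; simp [pvNxtAux]
  | succ fuel ih =>
    intro i
    unfold pvNxtAux
    split_ifs with h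
    · exact le_rfl
    · exact le_trans (Nat.le_succ i) (ih (i+1))

lemma pvNxtAux_le (kue : List Int) (v : Int) (fuel : Nat) :
    ∀ i, pvNxtAux kue v fuel i ≤ i + fuel := by
  induction fuel with
  | zero => intro i; simp [pvNxtAux]
  | succ fuel ih =>
    intro i
    unfold pvNxtAux
    split_ifs with h
    · omega
    · have := ih (i+1)
      omega

lemma pvNxtAux_not (kue : List Int) (v : Int) (fuel : Nat) :
    ∀ i t, i ≤ t → t < pvNxtAux kue v fuel i → pvG kue t ≠ v := by
  induction fuel with
  | zero => intro i t h1 h2; simp [pvNxtAux] at h2; omega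
  | succ fuel ih =>
    intro i t h1 h2
    unfold pvNxtAux at h2
    split_ifs at h2 with h
    · omega
    · by_cases ht : t = i
      · subst ht; exact h
      · exact ih (i+1) t (by omega) h2

lemma pvNxtAux_eq_or (kue : List Int) (v : Int) (fuel : Nat) :
    ∀ i, pvNxtAux kue v fuel i = i + fuel ∨ pvG kue (pvNxtAux kue v fuel i) = v := by
  induction fuel with
  | zero => intro i; left; simp [pvNxtAux]
  | succ fuel ih =>
    intro i
    unfold pvNxtAux
    split_ifs with h
    · right; exact h
    · rcases ih (i+1) with h1 | h1
      · left; omega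
      · right; exact h1

lemma pvNxt_gt (kue : List Int) (m l : Nat) : l < pvNxt kue m l :=
  lt_of_lt_of_le (Nat.lt_succ_self l) (pvNxtAux_ge kue (pvG kue l) (m - (l+1)) (l+1))

lemma pvNxt_not (kue : List Int) (m l t : Nat) (h1 : l < t) (h2 : t < pvNxt kue m l) :
    pvG kue t ≠ pvG kue l :=
  pvNxtAux_not kue (pvG kue l) (m - (l+1)) (l+1) t (by omega) h2

lemma pvNxt_eq_or (kue : List Int) (m l : Nat) (h : l < m) :
    pvNxt kue m l = m ∨ pvG kue (pvNxt kue m l) = pvG kue l := by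
  rcases pvNxtAux_eq_or kue (pvG kue l) (m - (l+1)) (l+1) with h1 | h1
  · left; unfold pvNxt; omega
  · right; exact h1

lemma pvNxt_min (kue : List Int) (m l t : Nat) (h1 : l < t) (h3 : pvG kue t = pvG kue l) :
    pvNxt kue m l ≤ t := by
  by_contra h
  exact pvNxt_not kue m l t h1 (by omega) h3

lemma pvCnt_rec (kue : List Int) (m l : Nat) :
    ∀ r, l ≤ r → r < m →
    pvCnt kue l (r+1) = pvCnt kue (l+1) (r+1) + (if r < pvNxt kue m l then 1 else 0) := by
  intro r hlr
  induction r, hlr using Nat.le_induction with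
  | base =>
    intro _
    rw [pvCnt_succ kue l l le_rfl, pvCnt_self, pvCnt_self]
    have h1 : pvNew kue l l = true := by
      simp only [pvNew, decide_eq_true_eq]
      intro t ht1 ht2
      omega
    rw [h1, if_pos (pvNxt_gt kue m l)]
    simp
  | succ r hlr ih =>
    intro hr1m
    have IH := ih (by omega)
    rw [pvCnt_succ kue l (r+1) (by omega), pvCnt_succ kue (l+1) (r+1) (by omega), IH]
    have hgt := pvNxt_gt kue m l
    suffices h : (if r < pvNxt kue m l then 1 else 0) + (if pvNew kue l (r+1) then 1 else 0)
        = (if pvNew kue (l+1) (r+1) then 1 else 0) + (if r + 1 < pvNxt kue m l then 1 else 0) by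
      omega
    by_cases hx : pvNxt kue m l = r + 1
    · have hg : pvG kue (r+1) = pvG kue l := by
        rcases pvNxt_eq_or kue m l (by omega) with h | h
        · omega
        · rw [← hx]; exact h
      have hnl : pvNew kue l (r+1) = false := by
        simp only [pvNew, decide_eq_false_iff_not]
        push_neg
        exact ⟨l, le_rfl, by omega, hg.symm⟩
      have hnl1 : pvNew kue (l+1) (r+1) = true := by
        simp only [pvNew, decide_eq_true_eq]
        intro t ht1 ht2 hEq
        rw [hg] at hEq
        have := pvNxt_min kue m l t (by omega) hEq
        omega
      rw [hnl, hnl1]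
      rw [if_pos (show r < pvNxt kue m l by omega),
        if_neg (show ¬ r + 1 < pvNxt kue m l by omega)]
      simp
    · have hiff : (r < pvNxt kue m l) ↔ (r + 1 < pvNxt kue m l) := by omega
      have heq : pvNew kue l (r+1) = pvNew kue (l+1) (r+1) := by
        cases h1 : pvNew kue (l+1) (r+1) with
        | true =>
          simp only [pvNew, decide_eq_true_eq] at h1 ⊢
          intro t ht1 ht2 hEq
          by_cases htl : t = l
          · subst htl
            have hmin := pvNxt_min kue m t (r+1) (by omega) hEq.symm
            have : pvNxt kue m t < r + 1 := by omega
            rcases pvNxt_eq_or kue m t (by omega) with h2 | h2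
            · omega
            · exact h1 (pvNxt kue m t) (by have := pvNxt_gt kue m t; omega) this
                (by rw [h2, hEq])
          · exact h1 t (by omega) ht2 hEq
        | false =>
          simp only [pvNew, decide_eq_false_iff_not] at h1 ⊢
          push_neg at h1 ⊢
          obtain ⟨t, h2, h3, h4⟩ := h1
          exact ⟨t, by omega, h3, h4⟩
      have hif : (if r < pvNxt kue m l then (1:Nat) else 0)
          = (if r + 1 < pvNxt kue m l then 1 else 0) := if_congr hiff rfl rfl
      rw [heq, hif]
      omega

lemma pvRow_rec (kue : List Int) (m l : Nat) (hlm : l < m) :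
    List.replicate l (0 : Int) ++ (PySem.List.pyRange (l : Int) (m : Int) 1).map
      (fun r => PySem.List.pyGetD (pvRow kue m (l+1) m) r 0 +
        (if r < ((pvNxt kue m l : Nat) : Int) then 1 else 0))
    = pvRow kue m l m := by
  rw [PySem.List.pyRange_one]
  have hml : ((m : Int) - (l : Int)).toNat = m - l := by omega
  rw [hml]
  apply List.ext_getElem
  · simp [pvRow]
    omega
  · intro t h1 h2
    simp only [List.length_append, List.length_replicate, List.length_map, List.length_range] at h1
    simp only [pvRow, List.length_map, List.length_range] at h2
    by_cases htl : t < l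
    · rw [List.getElem_append_left (by simpa using htl)]
      simp only [pvRow, List.getElem_map, List.getElem_range, List.getElem_replicate]
      rw [if_neg (by omega)]
    · push_neg at htl
      rw [List.getElem_append_right (by simpa using htl)]
      simp only [List.getElem_map, List.getElem_range, List.length_replicate]
      have hidx : t - l < m - l := by omega
      have hcast : (l : Int) + ((t - l : Nat) : Int) = ((t : Nat) : Int) := by omega
      rw [hcast, PySem.List.pyGetD_natCast]
      have hgetD : (pvRow kue m (l+1) m).getD t 0 = ((pvCnt kue (l+1) (t+1) : Nat) : Int) := by
        have htm : t < (pvRow kue m (l+1) m).length := by simp [pvRow]; omega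
        rw [List.getD_eq_getElem?_getD, List.getElem?_eq_getElem htm]
        simp only [pvRow, List.getElem_map, List.getElem_range, Option.getD_some]
        by_cases h : l + 1 ≤ t
        · rw [if_pos ⟨h, by omega⟩]
        · rw [if_neg (by omega)]
          have htl2 : t = l := by omega
          rw [htl2, pvCnt_self]
          simp
      rw [hgetD]
      have hcnt := pvCnt_rec kue m l t htl (by omega)
      simp only [pvRow, List.getElem_map, List.getElem_range]
      rw [if_pos (show l ≤ t ∧ t < m from ⟨htl, by omega⟩)]
      by_cases h : t < pvNxt kue m l
      · rw [if_pos (by exact_mod_cast h), hcnt, if_pos h]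
        push_cast
        ring
      · rw [if_neg (by exact_mod_cast h), hcnt, if_neg h]
        push_cast
        ring

lemma nxtB (kue : List Int) (m : Nat) :
    ∀ k : Nat, k ≤ m →
    ∃ d : PySem.Dict Int Int,
      ((PySem.List.pyRange 0 (k : Int) 1).foldl
        (fun (st : List Int × PySem.Dict Int Int) i =>
          ((PySem.List.pySetD st.1 ((m : Int) - 1 - i)
              (st.2.getD (PySem.List.pyGetD kue ((m : Int) - 1 - i) 0) (m : Int))),
           st.2.insert (PySem.List.pyGetD kue ((m : Int) - 1 - i) 0) ((m : Int) - 1 - i)))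
        (List.replicate m (0 : Int), PySem.Dict.empty))
      = ((List.range m).map (fun l => if m - k ≤ l then ((pvNxt kue m l : Nat) : Int) else 0), d)
      ∧ (∀ v, d.get? v = (if pvNxtAux kue v k (m - k) < m
            then some ((pvNxtAux kue v k (m - k) : Nat) : Int) else none)) := by
  intro k
  induction k with
  | zero =>
    intro _
    refine ⟨PySem.Dict.empty, ?_, ?_⟩
    · simp only [Nat.cast_zero]
      rw [PySem.List.pyRange_one_eq_nil le_rfl, List.foldl_nil]
      refine Prod.ext ?_ rfl
      simp only []
      rw [List.map_congr_left (g := fun _ => (0 : Int))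
          (fun q hq => by rw [if_neg]; have := List.mem_range.mp hq; omega),
        List.map_const', List.length_range]
    · intro v
      rw [PySem.Dict.get?_empty]
      have h0 : pvNxtAux kue v 0 (m - 0) = m := by simp [pvNxtAux]
      rw [h0, if_neg (by omega)]
  | succ k ih =>
    intro hk1
    have hkm : k < m := by omega
    obtain ⟨d, hfold, hget⟩ := ih (by omega)
    rw [show ((k + 1 : Nat) : Int) = (k : Int) + 1 by push_cast; ring,
      PySem.List.pyRange_one_succ_right (by exact_mod_cast Nat.zero_le k), List.foldl_append,
      hfold, List.foldl_cons, List.foldl_nil]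
    have hlN : (m : Int) - 1 - (k : Int) = ((m - 1 - k : Nat) : Int) := by omega
    set lN : Nat := m - 1 - k with hlNdef
    have hmk : m - k = lN + 1 := by omega
    have hmk1 : m - (k + 1) = lN := by omega
    have hv : PySem.List.pyGetD kue ((lN : Nat) : Int) 0 = pvG kue lN :=
      PySem.List.pyGetD_natCast kue lN 0
    have hnxtval : d.getD (pvG kue lN) (m : Int) = ((pvNxt kue m lN : Nat) : Int) := by
      rw [PySem.Dict.getD_eq_get?_getD, hget (pvG kue lN)]
      have hpv : pvNxt kue m lN = pvNxtAux kue (pvG kue lN) k (m - k) := by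
        unfold pvNxt
        rw [hmk]
        congr 1
        omega
      split_ifs with h
      · rw [hpv]; rfl
      · have h1 := pvNxtAux_le kue (pvG kue lN) k (m - k)
        have : pvNxtAux kue (pvG kue lN) k (m - k) = m := by omega
        rw [hpv, this]
        rfl
    refine ⟨d.insert (pvG kue lN) ((lN : Nat) : Int), ?_, ?_⟩
    · rw [hlN]
      simp only [hv, hnxtval, PySem.List.pySetD_natCast]
      refine Prod.ext ?_ rfl
      apply List.ext_getElem
      · simp
      · intro t h1 h2
        simp only [List.length_set, List.length_map, List.length_range] at h1
        simp only [List.getElem_set, List.getElem_map, List.getElem_range]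
        by_cases ht : lN = t
        · subst ht
          rw [if_pos rfl, if_pos (by omega)]
        · rw [if_neg ht]
          have h3 : (m - k ≤ t) ↔ (m - (k + 1) ≤ t) := by omega
          simp only [h3]
    · intro v
      rw [hmk1, PySem.Dict.get?_insert]
      have hstep : pvNxtAux kue v (k+1) lN
          = if pvG kue lN = v then lN else pvNxtAux kue v k (lN + 1) := rfl
      by_cases hvv : v = pvG kue lN
      · rw [if_pos hvv, hstep, if_pos hvv.symm, if_pos (by omega)]
      · have hstep2 : pvNxtAux kue v (k+1) lN = pvNxtAux kue v k (lN + 1) := by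
          rw [hstep, if_neg (fun h => hvv h.symm)]
        rw [if_neg hvv, hstep2, ← hmk, hget v]

lemma rowsB (kue : List Int) (m : Nat) :
    ∀ k : Nat, k ≤ m →
    ((PySem.List.pyRange 0 (k : Int) 1).foldl
      (fun (rb : List (List Int) × List Int) i =>
        (rb.1 ++ [List.replicate ((((m : Int) - 1 - i).toNat)) (0 : Int) ++
            (PySem.List.pyRange ((m : Int) - 1 - i) (m : Int) 1).map (fun r =>
              PySem.List.pyGetD rb.2 r 0 +
                (if r < PySem.List.pyGetD
                    ((List.range m).map (fun l => ((pvNxt kue m l : Nat) : Int)))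
                    ((m : Int) - 1 - i) 0 then 1 else 0))],
         List.replicate ((((m : Int) - 1 - i).toNat)) (0 : Int) ++
            (PySem.List.pyRange ((m : Int) - 1 - i) (m : Int) 1).map (fun r =>
              PySem.List.pyGetD rb.2 r 0 +
                (if r < PySem.List.pyGetD
                    ((List.range m).map (fun l => ((pvNxt kue m l : Nat) : Int)))
                    ((m : Int) - 1 - i) 0 then 1 else 0))))
      ([], List.replicate m (0 : Int)))
    = ((List.range k).map (fun i => pvRow kue m (m - 1 - i) m), pvRow kue m (m - k) m) := by
  intro k
  induction k with
  | zero =>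
    intro _
    simp only [Nat.cast_zero]
    rw [PySem.List.pyRange_one_eq_nil le_rfl, List.foldl_nil]
    rw [List.range_zero, List.map_nil, Nat.sub_zero, pvRow_self]
  | succ k ih =>
    intro hk1
    have hkm : k < m := by omega
    rw [show ((k + 1 : Nat) : Int) = (k : Int) + 1 by push_cast; ring,
      PySem.List.pyRange_one_succ_right (by exact_mod_cast Nat.zero_le k), List.foldl_append,
      ih (by omega), List.foldl_cons, List.foldl_nil]
    have hlN : (m : Int) - 1 - (k : Int) = ((m - 1 - k : Nat) : Int) := by omega
    set lN : Nat := m - 1 - k with hlNdef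
    have hmk : m - k = lN + 1 := by omega
    have hmk1 : m - (k + 1) = lN := by omega
    have hnget : PySem.List.pyGetD
        ((List.range m).map (fun l => ((pvNxt kue m l : Nat) : Int))) ((lN : Nat) : Int) 0
        = ((pvNxt kue m lN : Nat) : Int) := by
      rw [PySem.List.pyGetD_natCast, List.getD_eq_getElem?_getD, List.getElem?_map,
        List.getElem?_range (by omega)]
      rfl
    have hrow : List.replicate (((lN : Nat) : Int)).toNat (0 : Int) ++
        (PySem.List.pyRange ((lN : Nat) : Int) (m : Int) 1).map (fun r =>
          PySem.List.pyGetD (pvRow kue m (m - k) m) r 0 +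
            (if r < ((pvNxt kue m lN : Nat) : Int) then 1 else 0))
        = pvRow kue m lN m := by
      rw [Int.toNat_natCast, hmk]
      exact pvRow_rec kue m lN (by omega)
    rw [hlN]
    simp only [hnget]
    rw [hrow]
    refine Prod.ext ?_ (by simp only [hmk1])
    simp only [hmk1]
    rw [List.range_succ, List.map_append, List.map_cons, List.map_nil]

lemma rev_map_range {α : Type} (f : Nat → α) (m : Nat) :
    ((List.range m).map (fun i => f (m - 1 - i))).reverse = (List.range m).map f := by
  apply List.ext_getElem
  · simp
  · intro t h1 h2
    simp only [List.length_reverse, List.length_map, List.length_range] at h1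
    rw [List.getElem_reverse]
    simp only [List.getElem_map, List.getElem_range, List.length_map, List.length_range]
    congr 1
    omega

lemma tableB (kue : List Int) (n : Int) :
    hitungNilaiSegmen_alt kue n = (List.range n.toNat).map (fun l => pvRow kue n.toNat l n.toNat) := by
  by_cases hn0 : n ≤ 0
  · have h0 : n.toNat = 0 := by omega
    rw [h0]
    simp [hitungNilaiSegmen_alt, PySem.List.pyRange_one_eq_nil hn0,
      PySem.List.slice?_none_none_neg_one]
  · push_neg at hn0
    have hnm : ((n.toNat : Nat) : Int) = n := by omega
    rw [← hnm]
    set m : Nat := n.toNat with hmdef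
    simp only [Int.toNat_natCast]
    have hdef : hitungNilaiSegmen_alt kue ((m : Nat) : Int) =
      (PySem.List.slice?
        ((PySem.List.pyRange 0 ((m : Nat) : Int) 1).foldl
          (fun (rb : List (List Int) × List Int) i =>
            (rb.1 ++ [PySem.List.pyRepeat [(0 : Int)] (((m : Nat) : Int) - 1 - i) ++
                (PySem.List.pyRange (((m : Nat) : Int) - 1 - i) ((m : Nat) : Int) 1).map (fun r =>
                  PySem.List.pyGetD rb.2 r 0 +
                    (if r < PySem.List.pyGetD
                        (((PySem.List.pyRange 0 ((m : Nat) : Int) 1).foldl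
                          (fun (st : List Int × PySem.Dict Int Int) i =>
                            ((PySem.List.pySetD st.1 (((m : Nat) : Int) - 1 - i)
                                (st.2.getD (PySem.List.pyGetD kue (((m : Nat) : Int) - 1 - i) 0) ((m : Nat) : Int))),
                             st.2.insert (PySem.List.pyGetD kue (((m : Nat) : Int) - 1 - i) 0)
                               (((m : Nat) : Int) - 1 - i)))
                          (PySem.List.pyRepeat [(0 : Int)] ((m : Nat) : Int), PySem.Dict.empty)).1)
                        (((m : Nat) : Int) - 1 - i) 0 then 1 else 0))],
              PySem.List.pyRepeat [(0 : Int)] (((m : Nat) : Int) - 1 - i) ++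
                (PySem.List.pyRange (((m : Nat) : Int) - 1 - i) ((m : Nat) : Int) 1).map (fun r =>
                  PySem.List.pyGetD rb.2 r 0 +
                    (if r < PySem.List.pyGetD
                        (((PySem.List.pyRange 0 ((m : Nat) : Int) 1).foldl
                          (fun (st : List Int × PySem.Dict Int Int) i =>
                            ((PySem.List.pySetD st.1 (((m : Nat) : Int) - 1 - i)
                                (st.2.getD (PySem.List.pyGetD kue (((m : Nat) : Int) - 1 - i) 0) ((m : Nat) : Int))),
                             st.2.insert (PySem.List.pyGetD kue (((m : Nat) : Int) - 1 - i) 0)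
                               (((m : Nat) : Int) - 1 - i)))
                          (PySem.List.pyRepeat [(0 : Int)] ((m : Nat) : Int), PySem.Dict.empty)).1)
                        (((m : Nat) : Int) - 1 - i) 0 then 1 else 0))))
          ([], PySem.List.pyRepeat [(0 : Int)] ((m : Nat) : Int))).1
        none none (-1)).getD [] := rfl
    rw [hdef]
    simp only [PySem.List.pyRepeat_singleton, Int.toNat_natCast]
    obtain ⟨d, hfold1, -⟩ := nxtB kue m m le_rfl
    rw [hfold1]
    have hproj : (((List.range m).map (fun l => if m - m ≤ l then ((pvNxt kue m l : Nat) : Int) else 0), d)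
        : List Int × PySem.Dict Int Int).1
        = (List.range m).map (fun l => ((pvNxt kue m l : Nat) : Int)) := by
      simp only []
      exact List.map_congr_left (by intro q hq; rw [if_pos (by omega)])
    rw [hproj]
    have hrows := rowsB kue m m le_rfl
    rw [hrows]
    simp only []
    rw [PySem.List.slice?_none_none_neg_one, Option.getD_some]
    exact rev_map_range (fun l => pvRow kue m l m) m

-- ===== VERDICT (by name: the statement is the Claim_ definition above) =====
theorem hitungNilaiSegmen_spec : Claim_equal_hitungNilaiSegmen := by
  intro kue n _ _
  unfold Spec_hitungNilaiSegmen
  rw [tableA kue n, tableB kue n]
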